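-- pv_equiv track=rewrite | github.com/rkilianski/inverse_design | hermite-gauss/large_obs_script.py | enlarge_block
-- ===== SOURCE A (Python) =====
-- def enlarge_block(arr, axes, multi):
--     new_points = []
--     u, v, w = axes
--     for tup in arr:
--         for i in range(0, multi):
--             new_x = tup[0] + i
--             for j in range(multi):
--                 new_y = tup[1] + j
--                 for k in range(multi):
--                     new_z = tup[2] + k
--                     new_points.append((new_x, new_y, new_z))
--
--     return new_points
-- ===== SOURCE B (Python) =====
-- def enlarge_block(arr, axes, multi):
--     # Staged expansion: three successive whole-list passes, each replicating
--     # every current point along ONE coordinate. Equivalent to the nested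
--     # loops because flattening stages composes to the same i,j,k order.
--     pts = [(x + i, y, z) for (x, y, z) in arr for i in range(multi)]
--     pts = [(x, y + j, z) for (x, y, z) in pts for j in range(multi)]
--     return [(x, y, z + k) for (x, y, z) in pts for k in range(multi)]
-- ===== Notes on version B (the rewrite author's own statement) =====
-- stated objective: alternative
-- what changed: B replaces A's three nested per-point loops with three staged whole-list passes, each pass replicating every point along one coordinate (x, then y, then z), building intermediate lists of size n*multi and n*multi^2.
import Mathlib
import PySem

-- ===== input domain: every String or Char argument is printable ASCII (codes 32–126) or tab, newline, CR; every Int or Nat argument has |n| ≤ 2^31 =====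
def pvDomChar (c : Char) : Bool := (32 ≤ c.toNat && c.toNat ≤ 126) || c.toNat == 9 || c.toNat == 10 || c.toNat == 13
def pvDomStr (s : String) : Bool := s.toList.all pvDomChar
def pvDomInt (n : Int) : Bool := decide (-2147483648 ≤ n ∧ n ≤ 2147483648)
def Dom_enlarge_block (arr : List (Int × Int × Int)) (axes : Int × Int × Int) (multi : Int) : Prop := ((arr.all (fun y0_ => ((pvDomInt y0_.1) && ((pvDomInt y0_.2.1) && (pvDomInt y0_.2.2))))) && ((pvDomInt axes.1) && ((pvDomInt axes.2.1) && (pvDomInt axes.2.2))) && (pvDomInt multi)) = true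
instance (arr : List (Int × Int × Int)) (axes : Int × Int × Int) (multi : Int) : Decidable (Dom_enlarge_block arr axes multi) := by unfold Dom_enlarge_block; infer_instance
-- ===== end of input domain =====

-- B replaces A's nested per-point loops with three staged whole-list passes, each expanding one coordinate (alternative decomposition, same cost).


-- ===== PORT A =====
def enlarge_block (arr : List (Int × Int × Int)) (axes : Int × Int × Int) (multi : Int) : List (Int × Int × Int) :=
  arr.foldl (fun acc tup =>
    (PySem.List.pyRange 0 multi 1).foldl (fun acc i =>
      let new_x := tup.1 + i
      (PySem.List.pyRange 0 multi 1).foldl (fun acc j =>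
        let new_y := tup.2.1 + j
        (PySem.List.pyRange 0 multi 1).foldl (fun acc k =>
          let new_z := tup.2.2 + k
          acc ++ [(new_x, new_y, new_z)]) acc) acc) acc) []

-- ===== PORT B =====
def enlarge_block_alt (arr : List (Int × Int × Int)) (axes : Int × Int × Int) (multi : Int) : List (Int × Int × Int) :=
  let pts1 := arr.flatMap (fun p => (PySem.List.pyRange 0 multi 1).map (fun i => (p.1 + i, p.2.1, p.2.2)))
  let pts2 := pts1.flatMap (fun p => (PySem.List.pyRange 0 multi 1).map (fun j => (p.1, p.2.1 + j, p.2.2)))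
  pts2.flatMap (fun p => (PySem.List.pyRange 0 multi 1).map (fun k => (p.1, p.2.1, p.2.2 + k)))

-- ===== PRECONDITION & SPEC =====
def Spec_enlarge_block (arr : List (Int × Int × Int)) (axes : Int × Int × Int) (multi : Int) (out : List (Int × Int × Int)) : Prop := out = enlarge_block_alt arr axes multi
instance (arr : List (Int × Int × Int)) (axes : Int × Int × Int) (multi : Int) (out : List (Int × Int × Int)) : Decidable (Spec_enlarge_block arr axes multi out) := by unfold Spec_enlarge_block; infer_instance

-- ===== CLAIM (what is proved, stated in full; the proofs are below) =====
def Claim_equal_enlarge_block : Prop := ∀ (arr : List (Int × Int × Int)) (axes : Int × Int × Int) (multi : Int), Dom_enlarge_block arr axes multi → Spec_enlarge_block arr axes multi (enlarge_block arr axes multi)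

-- ===== LEMMAS AND PROOFS =====
-- canonical flatMap normal form shared by both proofs
def pvCanon (multi : Int) (tup : Int × Int × Int) : List (Int × Int × Int) :=
  (PySem.List.pyRange 0 multi 1).flatMap (fun i =>
    (PySem.List.pyRange 0 multi 1).flatMap (fun j =>
      (PySem.List.pyRange 0 multi 1).map (fun k => (tup.1 + i, tup.2.1 + j, tup.2.2 + k))))

theorem pv_flatten_map_singleton {A B : Type} (l : List A) (f : A → B) :
    (l.map (fun x => [f x])).flatten = l.map f := by
  induction l with
  | nil => rfl
  | cons x xs ih => simp [ih]

theorem enlarge_block_A_canon (multi : Int) (arr : List (Int × Int × Int))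
    (acc : List (Int × Int × Int)) :
    arr.foldl (fun acc tup =>
      (PySem.List.pyRange 0 multi 1).foldl (fun acc i =>
        (PySem.List.pyRange 0 multi 1).foldl (fun acc j =>
          (PySem.List.pyRange 0 multi 1).foldl (fun acc k =>
            acc ++ [(tup.1 + i, tup.2.1 + j, tup.2.2 + k)]) acc) acc) acc) acc =
    acc ++ arr.flatMap (pvCanon multi) := by
  simp only [PySem.List.foldl_append_eq_flatMap]
  congr 1
  refine List.flatMap_congr (fun tup _ => ?_)
  simp [pvCanon, List.flatMap_def, pv_flatten_map_singleton]

-- ===== VERDICT (by name: the statement is the Claim_ definition above) =====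
theorem enlarge_block_spec : Claim_equal_enlarge_block := by
  intro arr axes multi _
  unfold Spec_enlarge_block enlarge_block enlarge_block_alt
  rw [enlarge_block_A_canon]
  simp [List.flatMap_assoc, List.flatMap_map]
  exact List.flatMap_congr (fun tup _ => by simp [pvCanon])
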